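-- pv_equiv track=rewrite | github.com/simsang1l/Programmers | python/level2/다시보기/n^2배열_자르기.py | solution
-- ===== SOURCE A (Python) =====
-- def solution(n, left, right):
--     answer = []
--     cnt = 0
--
--     for i in range(n):
--         num = i + 1
--         for j in range(n):
--             if num <= i+1 and j <= i:
--                 pass
--             else :
--                 num += 1
--             if cnt > right + 1:
--                 break
--
--             if left <= cnt <= right:
--                 answer.append(num)
--
--             cnt += 1
--
--     return answer
-- ===== SOURCE B (Python) =====
-- def solution(n, left, right):
--     if n <= 0:
--         return []
--     lo = max(left, 0)
--     hi = min(right, n * n - 1)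
--     return [max(k // n, k % n) + 1 for k in range(lo, hi + 1)]
-- ===== Notes on version B (the rewrite author's own statement) =====
-- stated objective: faster
-- what changed: Instead of scanning all n^2 cells with a counter and a manually maintained running cell value, B iterates only over the requested index window left..right and computes each cell directly as max(k//n, k%n)+1.
import Mathlib
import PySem

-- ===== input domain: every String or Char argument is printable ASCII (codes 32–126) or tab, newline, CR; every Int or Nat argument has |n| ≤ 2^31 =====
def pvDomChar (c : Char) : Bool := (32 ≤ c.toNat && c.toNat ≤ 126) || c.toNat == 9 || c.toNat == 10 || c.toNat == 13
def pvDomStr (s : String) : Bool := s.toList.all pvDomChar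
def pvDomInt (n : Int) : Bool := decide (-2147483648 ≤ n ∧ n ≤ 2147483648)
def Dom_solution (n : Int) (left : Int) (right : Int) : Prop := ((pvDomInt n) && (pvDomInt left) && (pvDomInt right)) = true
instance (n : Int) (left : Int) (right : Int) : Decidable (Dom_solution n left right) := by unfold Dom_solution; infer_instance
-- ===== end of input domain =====

-- B replaces A's O(n^2) full scan (counter + manually stepped cell value) by a direct
-- O(right-left) pass over the requested window only, computing each cell as max(k//n, k%n)+1.

-- ===== PORT A =====
-- inner `for j in range(n)` loop: state (num, cnt, answer); returns (cnt, answer); early return = `break`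
def solInner (i left right : Int) : List Int → Int → Int → List Int → Int × List Int
  | [], _num, cnt, answer => (cnt, answer)
  | j :: js, num, cnt, answer =>
    let num' := if num ≤ i + 1 ∧ j ≤ i then num else num + 1
    if cnt > right + 1 then (cnt, answer)
    else
      solInner i left right js num' (cnt + 1)
        (if left ≤ cnt ∧ cnt ≤ right then answer ++ [num'] else answer)

-- outer `for i in range(n)` loop
def solOuter (n left right : Int) : List Int → Int → List Int → List Int
  | [], _cnt, answer => answer
  | i :: is, cnt, answer =>
    let r := solInner i left right (PySem.List.pyRange 0 n 1) (i + 1) cnt answer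
    solOuter n left right is r.1 r.2

def solution (n : Int) (left : Int) (right : Int) : List Int :=
  solOuter n left right (PySem.List.pyRange 0 n 1) 0 []

-- ===== PORT B =====
def solution_alt (n : Int) (left : Int) (right : Int) : List Int :=
  if n ≤ 0 then []
  else
    let lo := max left 0
    let hi := min right (n * n - 1)
    (PySem.List.pyRange lo (hi + 1) 1).map
      (fun k => max (PySem.Int.floordiv k n) (PySem.Int.mod k n) + 1)

-- ===== PRECONDITION & SPEC =====
def Spec_solution (n : Int) (left : Int) (right : Int) (out : List Int) : Prop := out = solution_alt n left right
instance (n : Int) (left : Int) (right : Int) (out : List Int) : Decidable (Spec_solution n left right out) := by unfold Spec_solution; infer_instance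

-- ===== CLAIM (what is proved, stated in full; the proofs are below) =====
def Claim_equal_solution : Prop := ∀ (n : Int) (left : Int) (right : Int), Dom_solution n left right → Spec_solution n left right (solution n left right)

-- ===== LEMMAS AND PROOFS =====

-- cell value at flat index k, filtered to the requested window
def cellF (n left right k : Int) : Option Int :=
  if left ≤ k ∧ k ≤ right then some (max (PySem.Int.floordiv k n) (PySem.Int.mod k n) + 1) else none

lemma cell_val (n i j : Int) (hn : 0 < n) (hj0 : 0 ≤ j) (hjn : j < n) :
    PySem.Int.floordiv (i * n + j) n = i ∧ PySem.Int.mod (i * n + j) n = j := by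
  rw [PySem.Int.floordiv_eq_ediv_of_pos hn, PySem.Int.mod_eq_emod_of_pos hn]
  constructor
  · have h1 : (j + i * n) / n = j / n + i := Int.add_mul_ediv_right j i (by omega)
    have h2 : j / n = 0 := Int.ediv_eq_zero_of_lt hj0 hjn
    rw [show i * n + j = j + i * n by ring, h1, h2, zero_add]
  · rw [show i * n + j = j + n * i by ring, Int.add_mul_emod_self_left, Int.emod_eq_of_lt hj0 hjn]

lemma inner_spec (n left right i : Int) (hn : 0 < n) (_h0i : 0 ≤ i) :
    ∀ (m : Nat) (j0 : Int) (ans : List Int), 0 ≤ j0 → j0 + m = n →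
      (solInner i left right (PySem.List.pyRange j0 n 1) (max i (j0 - 1) + 1) (i * n + j0) ans).2
        = ans ++ (PySem.List.pyRange j0 n 1).filterMap (fun j => cellF n left right (i * n + j))
      ∧ ((solInner i left right (PySem.List.pyRange j0 n 1) (max i (j0 - 1) + 1) (i * n + j0) ans).1
          = i * n + n
        ∨ (right + 1 < (solInner i left right (PySem.List.pyRange j0 n 1) (max i (j0 - 1) + 1) (i * n + j0) ans).1
          ∧ (solInner i left right (PySem.List.pyRange j0 n 1) (max i (j0 - 1) + 1) (i * n + j0) ans).1 ≤ i * n + n)) := by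
  intro m
  induction m with
  | zero =>
    intro j0 ans h0 hm
    have hj0n : j0 = n := by omega
    subst hj0n
    rw [PySem.List.pyRange_one_eq_nil le_rfl]
    simp [solInner]
  | succ m ih =>
    intro j0 ans h0 hm
    have hlt : j0 < n := by omega
    rw [PySem.List.pyRange_one_cons hlt]
    have hnum : (if max i (j0 - 1) + 1 ≤ i + 1 ∧ j0 ≤ i then max i (j0 - 1) + 1 else max i (j0 - 1) + 1 + 1)
        = max i j0 + 1 := by split_ifs <;> omega
    by_cases hbr : i * n + j0 > right + 1
    · -- break: nothing more is appended on this row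
      have hrow : (PySem.List.pyRange j0 n 1).filterMap (fun j => cellF n left right (i * n + j)) = [] := by
        rw [List.filterMap_eq_nil_iff]
        intro j hj
        rw [PySem.List.mem_pyRange_one] at hj
        have hno : ¬ (left ≤ i * n + j ∧ i * n + j ≤ right) := by omega
        simp [cellF, hno]
      rw [solInner, hnum, if_pos hbr]
      rw [← PySem.List.pyRange_one_cons hlt, hrow]
      exact ⟨by simp, Or.inr ⟨by omega, by nlinarith⟩⟩
    · rw [solInner, hnum, if_neg hbr]
      have hnum2 : max i j0 + 1 = max i ((j0 + 1) - 1) + 1 := by omega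
      have hcnt2 : i * n + j0 + 1 = i * n + (j0 + 1) := by ring
      rw [hnum2, hcnt2]
      obtain ⟨h1, h2⟩ := ih (j0 + 1)
        (if left ≤ i * n + j0 ∧ i * n + j0 ≤ right then ans ++ [max i ((j0 + 1) - 1) + 1] else ans)
        (by omega) (by omega)
      refine ⟨?_, h2⟩
      rw [h1, List.filterMap_cons]
      have hcv := cell_val n i j0 hn h0 hlt
      by_cases hw : left ≤ i * n + j0 ∧ i * n + j0 ≤ right
      · simp only [cellF, hcv.1, hcv.2, if_pos hw]
        have : max i ((j0 + 1) - 1) + 1 = max i j0 + 1 := by omega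
        simp [List.append_assoc]
      · simp only [cellF, if_neg hw]

lemma outer_spec (n left right : Int) (hn : 0 < n) :
    ∀ (m : Nat) (i0 cnt : Int) (ans : List Int), 0 ≤ i0 → i0 + m = n →
      (cnt = i0 * n ∨ (right + 1 < cnt ∧ right < i0 * n)) →
      solOuter n left right (PySem.List.pyRange i0 n 1) cnt ans
        = ans ++ (PySem.List.pyRange (i0 * n) (n * n) 1).filterMap (cellF n left right) := by
  intro m
  induction m with
  | zero =>
    intro i0 cnt ans h0 hm _
    have : i0 = n := by omega
    subst this
    rw [PySem.List.pyRange_one_eq_nil le_rfl, PySem.List.pyRange_one_eq_nil le_rfl]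
    simp [solOuter]
  | succ m ih =>
    intro i0 cnt ans h0 hm hinv
    have hlt : i0 < n := by omega
    have hmono : i0 * n + n ≤ n * n := by nlinarith
    have hrow_split : PySem.List.pyRange (i0 * n) (n * n) 1
        = PySem.List.pyRange (i0 * n) (i0 * n + n) 1 ++ PySem.List.pyRange (i0 * n + n) (n * n) 1 :=
      PySem.List.pyRange_one_append _ _ _ (by nlinarith) hmono
    rw [PySem.List.pyRange_one_cons hlt]
    rcases hinv with hc | ⟨hc1, hc2⟩
    · -- normal row: cnt is exactly the first flat index of row i0
      obtain ⟨h1, h2⟩ := inner_spec n left right i0 hn h0 n.toNat 0 ans le_rfl (by omega)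
      rw [show max i0 (0 - 1) + 1 = i0 + 1 by omega, show i0 * n + 0 = cnt by omega] at h1 h2
      rw [solOuter, h1]
      rw [ih (i0 + 1) _ _ (by omega) (by omega) ?_]
      · -- reassociate and convert the row filterMap to flat-index form
        have hshift : (PySem.List.pyRange 0 n 1).filterMap (fun j => cellF n left right (i0 * n + j))
            = (PySem.List.pyRange (i0 * n) (i0 * n + n) 1).filterMap (cellF n left right) := by
          rw [PySem.List.pyRange_one, PySem.List.pyRange_one, List.filterMap_map, List.filterMap_map]
          have harg : (i0 * n + n - i0 * n).toNat = (n - 0).toNat := by omega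
          rw [harg]
          apply List.filterMap_congr
          intro k _
          simp [Function.comp]
        rw [hrow_split, List.filterMap_append, hshift, List.append_assoc]
        have : (i0 + 1) * n = i0 * n + n := by ring
        rw [this]
      · rcases h2 with h2 | ⟨h2a, h2b⟩
        · left; rw [h2]; ring
        · right; constructor
          · omega
          · have : (i0 + 1) * n = i0 * n + n := by ring
            omega
    · -- cnt already past right+1: the row breaks immediately and contributes nothing
      have hrow_nil : (PySem.List.pyRange (i0 * n) (i0 * n + n) 1).filterMap (cellF n left right) = [] := by
        rw [List.filterMap_eq_nil_iff]
        intro k hk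
        rw [PySem.List.mem_pyRange_one] at hk
        have hno : ¬ (left ≤ k ∧ k ≤ right) := by omega
        simp [cellF, hno]
      have hfirst : PySem.List.pyRange 0 n 1 = 0 :: PySem.List.pyRange 1 n 1 :=
        PySem.List.pyRange_one_cons hn
      rw [solOuter, hfirst]
      simp only [solInner, if_pos (show cnt > right + 1 by omega)]
      rw [ih (i0 + 1) cnt ans (by omega) (by omega) (Or.inr ⟨hc1, by nlinarith⟩)]
      rw [show ((i0 + 1) * n : Int) = i0 * n + n by ring, hrow_split, List.filterMap_append,
        hrow_nil, List.nil_append]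

-- window extraction: filtering a range of ints to [left, right] and mapping g
lemma window_spec (left right : Int) (g : Int → Int) :
    ∀ (m : Nat) (c d : Int), d - c = m →
      (PySem.List.pyRange c d 1).filterMap (fun k => if left ≤ k ∧ k ≤ right then some (g k) else none)
        = (PySem.List.pyRange (max left c) (min right (d - 1) + 1) 1).map g := by
  intro m
  induction m with
  | zero =>
    intro c d hm
    rw [PySem.List.pyRange_one_eq_nil (by omega), PySem.List.pyRange_one_eq_nil (by omega)]
    simp
  | succ m ih =>
    intro c d hm
    have hlt : c < d := by omega
    rw [PySem.List.pyRange_one_cons hlt, List.filterMap_cons]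
    by_cases hin : left ≤ c ∧ c ≤ right
    · rw [if_pos hin, ih (c + 1) d (by omega)]
      have h1 : max left c = c := by omega
      have h2 : max left (c + 1) = c + 1 := by omega
      have h3 : c < min right (d - 1) + 1 := by omega
      rw [h1, h2, PySem.List.pyRange_one_cons h3, List.map_cons]
    · rw [if_neg hin, ih (c + 1) d (by omega)]
      by_cases hl : left ≤ c
      · -- then c > right: both ranges are empty
        rw [PySem.List.pyRange_one_eq_nil (by omega), PySem.List.pyRange_one_eq_nil (by omega)]
      · have : max left c = max left (c + 1) := by omega
        rw [this]

-- ===== VERDICT (by name: the statement is the Claim_ definition above) =====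
theorem solution_spec : Claim_equal_solution := by
  intro n left right _
  unfold Spec_solution solution solution_alt
  by_cases hn : n ≤ 0
  · rw [PySem.List.pyRange_one_eq_nil hn]
    simp [solOuter, if_pos hn]
  · have hn' : 0 < n := by omega
    rw [if_neg hn]
    rw [outer_spec n left right hn' n.toNat 0 0 [] le_rfl (by omega) (Or.inl (by ring))]
    rw [List.nil_append, show (0 : Int) * n = 0 by ring]
    have := window_spec left right
      (fun k => max (PySem.Int.floordiv k n) (PySem.Int.mod k n) + 1)
      (n * n).toNat 0 (n * n) (by have := mul_pos hn' hn'; omega)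
    simp only [cellF]
    rw [this]
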